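-- pv_equiv track=rewrite | github.com/cbintz/svmspamclassification | spamsvm.py | makeUniqueWordList
-- ===== SOURCE A (Python) =====
-- def makeUniqueWordList(spamList, hamList, type):
--     """ makes unique word dictionary based on given type (ham or spam),
--      and returns sorted word list by frequency for type of email """
--     uniqueDict = {}
--     if type == 'spam':
--         # make unique word list for spam emails
--         for word in spamList:
--             if word not in hamList:
--                 if word in uniqueDict.keys():
--                     uniqueDict[word] += 1
--                 else:
--                     uniqueDict[word] = 1
--     else:
--         # make unique word list for ham emails
--         for word in hamList:
--             if word not in spamList:
--                 if word in uniqueDict.keys():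
--                     uniqueDict[word] += 1
--                 else:
--                     uniqueDict[word] = 1
--     sortedList = sorted(uniqueDict, key=uniqueDict.get, reverse=True)
--     return sortedList
-- ===== SOURCE B (Python) =====
-- def makeUniqueWordList(spamList, hamList, type):
--     """Bucket (counting) sort instead of comparison sort: count the words of the
--     primary list that are absent from the other list, group the distinct words
--     into frequency buckets, and emit the buckets from the highest frequency down."""
--     primary, other = (spamList, hamList) if type == 'spam' else (hamList, spamList)
--     others = set(other)
--     counts = {}
--     for w in primary:
--         if w not in others:
--             counts[w] = counts.get(w, 0) + 1
--     if not counts: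
--         return []
--     maxc = max(counts.values())
--     buckets = {}
--     for w in counts:  # keys in first-occurrence order -> stable tie-breaking
--         buckets.setdefault(counts[w], []).append(w)
--     result = []
--     for c in range(maxc, 0, -1):
--         result.extend(buckets.get(c, []))
--     return result
-- ===== Notes on version B (the rewrite author's own statement) =====
-- stated objective: faster
-- what changed: B replaces A's comparison sort (sorted with key, reverse=True) by a bucket/counting sort — it groups the counted words into frequency buckets keyed by their count and emits the buckets from the maximum frequency down to 1, first-occurrence order inside each bucket giving the same stable tie-breaking — and tests exclusion against a set built once instead of scanning the other list for every word.
import Mathlib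
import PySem

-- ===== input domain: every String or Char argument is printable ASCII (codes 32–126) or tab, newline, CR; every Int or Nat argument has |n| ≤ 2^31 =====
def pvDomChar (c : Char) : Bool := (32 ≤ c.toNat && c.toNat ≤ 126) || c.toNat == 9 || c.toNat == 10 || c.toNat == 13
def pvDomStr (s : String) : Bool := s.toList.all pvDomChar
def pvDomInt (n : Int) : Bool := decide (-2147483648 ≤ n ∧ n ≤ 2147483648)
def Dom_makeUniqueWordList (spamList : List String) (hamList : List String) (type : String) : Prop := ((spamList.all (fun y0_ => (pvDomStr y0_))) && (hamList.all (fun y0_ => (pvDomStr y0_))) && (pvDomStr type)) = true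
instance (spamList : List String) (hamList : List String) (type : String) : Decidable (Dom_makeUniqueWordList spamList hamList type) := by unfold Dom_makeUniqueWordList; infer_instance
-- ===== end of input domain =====

-- B replaces A's comparison sort by a bucket (counting) sort over frequency buckets and the
-- per-word list scan by a prebuilt set (objective: faster, measured in a timing run).

-- ===== PORT A =====
def makeUniqueWordList (spamList : List String) (hamList : List String) (type : String) : List String :=
  let uniqueDict : PySem.Dict String Int :=
    if type = "spam" then
      -- for word in spamList: if word not in hamList: count it
      spamList.foldl (fun d word =>
        if word ∉ hamList then
          (if d.contains word then d.insert word (d.getD word 0 + 1) else d.insert word 1)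
        else d) PySem.Dict.empty
    else
      -- for word in hamList: if word not in spamList: count it
      hamList.foldl (fun d word =>
        if word ∉ spamList then
          (if d.contains word then d.insert word (d.getD word 0 + 1) else d.insert word 1)
        else d) PySem.Dict.empty
  -- sorted(uniqueDict, key=uniqueDict.get, reverse=True): every sorted element is a key of
  -- uniqueDict, so getD _ 0 is exactly dict.get there
  PySem.List.sorted uniqueDict.keys (fun w => uniqueDict.getD w 0) true

-- ===== PORT B =====
def makeUniqueWordList_alt (spamList : List String) (hamList : List String) (type : String) : List String :=
  let primary := if type = "spam" then spamList else hamList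
  let other := if type = "spam" then hamList else spamList
  let others : PySem.Set String := PySem.Set.ofList other   -- others = set(other), used for membership only
  -- for w in primary: if w not in others: counts[w] = counts.get(w, 0) + 1
  let counts : PySem.Dict String Int :=
    primary.foldl (fun d w => if w ∉ others then d.insert w (d.getD w 0 + 1) else d) PySem.Dict.empty
  -- 'if not counts: return []' + maxc = max(counts.values()): max? is none exactly when counts is empty
  match PySem.List.max? counts.values (fun v => v) with
  | none => []
  | some maxc =>
    -- for w in counts: buckets.setdefault(counts[w], []).append(w)
    -- (setdefault+append is Dict.modify with default []; counts[w] never raises: w is a key)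
    let buckets : PySem.Dict Int (List String) :=
      counts.keys.foldl (fun b w => b.modify (counts.getD w 0) [] (fun l => l ++ [w])) PySem.Dict.empty
    -- for c in range(maxc, 0, -1): result.extend(buckets.get(c, []))
    (PySem.List.pyRange maxc 0 (-1)).foldl (fun acc c => acc ++ buckets.getD c []) []

-- ===== PRECONDITION & SPEC =====
def Spec_makeUniqueWordList (spamList : List String) (hamList : List String) (type : String) (out : List String) : Prop := out = makeUniqueWordList_alt spamList hamList type
instance (spamList : List String) (hamList : List String) (type : String) (out : List String) : Decidable (Spec_makeUniqueWordList spamList hamList type out) := by unfold Spec_makeUniqueWordList; infer_instance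

-- ===== CLAIM (what is proved, stated in full; the proofs are below) =====
def Claim_equal_makeUniqueWordList : Prop := ∀ (spamList : List String) (hamList : List String) (type : String), Dom_makeUniqueWordList spamList hamList type → Spec_makeUniqueWordList spamList hamList type (makeUniqueWordList spamList hamList type)

-- ===== LEMMAS AND PROOFS =====

-- A's inner two-branch update is exactly "insert word (old count + 1)".
theorem stepA_eq (d : PySem.Dict String Int) (w : String) :
    (if d.contains w then d.insert w (d.getD w 0 + 1) else d.insert w 1) = d.insert w (d.getD w 0 + 1) := by
  by_cases h : d.contains w
  · simp [h]
  · have h' : d.contains w = false := by simpa using h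
    rw [PySem.Dict.getD_of_not_contains d 0 h']
    simp [h']

-- Both counting loops build the Counter of the primary words absent from the other list.
theorem dictA_eq (l other : List String) :
    l.foldl (fun d word =>
        if word ∉ other then
          (if d.contains word then d.insert word (d.getD word 0 + 1) else d.insert word 1)
        else d) (PySem.Dict.empty : PySem.Dict String Int)
    = PySem.Dict.counter (l.filter (fun w => decide (w ∉ other))) := by
  rw [← PySem.Dict.foldl_insert_getD_add_one_eq_counter, List.foldl_filter]
  refine PySem.List.foldl_congr_mem l _ _ _ (fun d w _ => ?_)
  by_cases h : w ∈ other
  · simp [h]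
  · simp [h, stepA_eq]

theorem dictB_eq (l other : List String) :
    l.foldl (fun d w => if w ∉ PySem.Set.ofList other then d.insert w (d.getD w 0 + 1) else d)
        (PySem.Dict.empty : PySem.Dict String Int)
    = PySem.Dict.counter (l.filter (fun w => decide (w ∉ other))) := by
  rw [← PySem.Dict.foldl_insert_getD_add_one_eq_counter, List.foldl_filter]
  refine PySem.List.foldl_congr_mem l _ _ _ (fun d w _ => ?_)
  by_cases h : w ∈ other
  · simp [h, (PySem.Set.mem_ofList other w).mpr h]
  · have : w ∉ PySem.Set.ofList other := fun hc => h ((PySem.Set.mem_ofList other w).mp hc)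
    simp [h, this]

-- The bucket-filling loop groups the words by their key value (in traversal order).
theorem buckets_getD (f : String → Int) :
    ∀ (ws : List String) (b : PySem.Dict Int (List String)) (c : Int),
    (ws.foldl (fun b w => b.modify (f w) [] (fun l => l ++ [w])) b).getD c []
      = b.getD c [] ++ ws.filter (fun w => decide (f w = c)) := by
  intro ws
  induction ws with
  | nil => intro b c; simp
  | cons w ws ih =>
    intro b c
    simp only [List.foldl_cons, ih, PySem.Dict.getD_modify, List.filter_cons]
    by_cases hc : c = f w
    · simp [hc, List.append_assoc]
    · have : ¬ f w = c := fun h => hc h.symm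
      simp [hc, this]

-- sorted(ys ++ [x], key, reverse=True) inserts x into sorted(ys, key, reverse=True).
theorem sorted_rev_append_singleton {κ : Type} [LT κ] [DecidableLT κ]
    (ys : List String) (x : String) (key : String → κ) :
    PySem.List.sorted (ys ++ [x]) key true
      = PySem.List.insertBy (fun a b => decide (key b < key a)) x (PySem.List.sorted ys key true) := by
  rw [PySem.List.sorted_rev_eq_foldl_insertBy, PySem.List.sorted_rev_eq_foldl_insertBy,
    List.foldl_append]
  rfl

theorem insertBy_append_not_before {α : Type} (before : α → α → Bool) (x : α) :
    ∀ (A L : List α), (∀ a ∈ A, before x a = false) →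
    PySem.List.insertBy before x (A ++ L) = A ++ PySem.List.insertBy before x L := by
  intro A
  induction A with
  | nil => intro L _; simp
  | cons a A ih =>
    intro L h
    have ha : before x a = false := h a (by simp)
    simp only [List.cons_append, PySem.List.insertBy, ha, Bool.false_eq_true, if_false]
    rw [ih L (fun a' ha' => h a' (by simp [ha']))]

theorem insertBy_all_before {α : Type} (before : α → α → Bool) (x : α)
    (L : List α) (h : ∀ y ∈ L, before x y = true) :
    PySem.List.insertBy before x L = x :: L := by
  cases L with
  | nil => rfl
  | cons y t => simp [PySem.List.insertBy, h y (by simp)]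

-- STABILITY: the maximal-key elements of a reverse sort come first, in original order.
theorem sorted_rev_split (f : String → Int) (n : Int) :
    ∀ ks : List String, (∀ w ∈ ks, f w ≤ n) →
    PySem.List.sorted ks f true
      = ks.filter (fun w => decide (f w = n))
        ++ PySem.List.sorted (ks.filter (fun w => decide (¬ f w = n))) f true := by
  intro ks
  induction ks using List.reverseRecOn with
  | nil => simp
  | append_singleton ys x ih =>
    intro h
    have hys : ∀ w ∈ ys, f w ≤ n := fun w hw => h w (by simp [hw])
    rw [sorted_rev_append_singleton, ih hys, List.filter_append, List.filter_append]
    by_cases hx : f x = n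
    · -- x joins the maximal block, after the earlier maximal elements
      rw [insertBy_append_not_before _ _ _ _ (fun a ha => ?_), insertBy_all_before _ _ _ (fun y hy => ?_)]
      · simp [hx]
      · -- every element of the sorted lower block has key < n = f x
        have hy' : y ∈ ys.filter (fun w => decide (¬ f w = n)) :=
          (PySem.List.sorted_perm _ f true).mem_iff.mp hy
        have h1 : f y ≤ n := hys y (List.mem_of_mem_filter hy')
        have h2 : ¬ f y = n := by simpa using (List.of_mem_filter hy')
        simp only [hx, decide_eq_true_eq]
        omega
      · -- no maximal element is strictly below f x = n
        have : f a = n := by simpa using (List.of_mem_filter ha)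
        simp only [decide_eq_false_iff_not, not_lt, this, hx]
        exact le_refl _
    · -- x belongs to the lower block: slide past the maximal prefix, insert into the sorted rest
      rw [insertBy_append_not_before _ _ _ _ (fun a ha => ?_),
        ← sorted_rev_append_singleton]
      · simp [hx]
      · have hfa : f a = n := by simpa using (List.of_mem_filter ha)
        have hxle : f x ≤ n := h x (by simp)
        simp only [decide_eq_false_iff_not, not_lt, hfa]
        exact hxle

-- BUCKET SORT: emitting the frequency buckets from n down to 1 IS the stable reverse sort.
theorem buckets_sorted (f : String → Int) :
    ∀ (n : Nat) (ks : List String), (∀ w ∈ ks, 1 ≤ f w ∧ f w ≤ (n : Int)) →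
    (PySem.List.pyRange (n : Int) 0 (-1)).flatMap
        (fun c => ks.filter (fun w => decide (f w = c)))
      = PySem.List.sorted ks f true := by
  intro n
  induction n with
  | zero =>
    intro ks h
    have : ks = [] := by
      cases ks with
      | nil => rfl
      | cons a t => exact absurd (h a (by simp)) (by push_cast; omega)
    subst this
    simp [PySem.List.pyRange_neg_one_eq_nil (le_refl (0 : Int)), PySem.List.sorted_eq_nil_iff]
  | succ n ih =>
    intro ks h
    have hcast : ((n + 1 : Nat) : Int) = (n : Int) + 1 := by push_cast; ring
    have hcons : PySem.List.pyRange ((n + 1 : Nat) : Int) 0 (-1)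
        = ((n : Int) + 1) :: PySem.List.pyRange ((n : Int) + 1 - 1) 0 (-1) := by
      rw [hcast, PySem.List.pyRange_neg_one_cons (by positivity)]
    have hsub : (n : Int) + 1 - 1 = (n : Int) := by ring
    rw [hcons, hsub, List.flatMap_cons]
    -- below the top bucket, filtering ks and filtering the lower words agree
    have hlow : ∀ c ∈ PySem.List.pyRange (n : Int) 0 (-1),
        ks.filter (fun w => decide (f w = c))
          = (ks.filter (fun w => decide (¬ f w = (n : Int) + 1))).filter
              (fun w => decide (f w = c)) := by
      intro c hc
      have hcb := (PySem.List.mem_pyRange_neg_one).mp hc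
      rw [List.filter_filter]
      refine (List.filter_congr (fun w _ => ?_)).symm
      by_cases hw : f w = c
      · have hne : ¬ c = (n : Int) + 1 := by omega
        simp [hw, hne]
      · simp [hw]
    have hflat : (PySem.List.pyRange (n : Int) 0 (-1)).flatMap
          (fun c => ks.filter (fun w => decide (f w = c)))
        = (PySem.List.pyRange (n : Int) 0 (-1)).flatMap
          (fun c => (ks.filter (fun w => decide (¬ f w = (n : Int) + 1))).filter
              (fun w => decide (f w = c))) := by
      rw [List.flatMap_def, List.flatMap_def, List.map_congr_left hlow]
    rw [hflat, ih _ (fun w hw => ?_), ← hcast,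
      ← sorted_rev_split f ((n + 1 : Nat) : Int) ks (fun w hw => (h w hw).2)]
    · have hmem := List.mem_of_mem_filter hw
      have hne : ¬ f w = (n : Int) + 1 := by simpa using (List.of_mem_filter hw)
      have := h w hmem
      rw [hcast] at this
      exact ⟨this.1, by omega⟩

-- The core equality for one direction's lists.
theorem core_eq (l other : List String) :
    PySem.List.sorted (PySem.Dict.counter (l.filter (fun w => decide (w ∉ other)))).keys
        (fun w => (PySem.Dict.counter (l.filter (fun w => decide (w ∉ other)))).getD w 0) true
      = (match PySem.List.max? (PySem.Dict.counter (l.filter (fun w => decide (w ∉ other)))).values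
              (fun v => v) with
        | none => ([] : List String)
        | some maxc =>
          let counts := PySem.Dict.counter (l.filter (fun w => decide (w ∉ other)))
          let buckets : PySem.Dict Int (List String) :=
            counts.keys.foldl (fun b w => b.modify (counts.getD w 0) [] (fun l => l ++ [w]))
              PySem.Dict.empty
          (PySem.List.pyRange maxc 0 (-1)).foldl (fun acc c => acc ++ buckets.getD c []) []) := by
  set lf := l.filter (fun w => decide (w ∉ other)) with hlf
  set C := PySem.Dict.counter lf with hC
  cases hmax : PySem.List.max? C.values (fun v => v) with
  | none =>
    have hv : C.values = [] := (PySem.List.max?_eq_none_iff _ _).mp hmax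
    have hk : C.keys = [] := by
      have : C.items = [] := by
        cases hit : C.items with
        | nil => rfl
        | cons p t =>
          exfalso
          have : C.values = C.items.map (·.2) := rfl
          rw [hit] at this
          simp [this] at hv
      have hkk : C.keys = C.items.map (·.1) := rfl
      rw [hkk, this]; rfl
    simp [hk, PySem.List.sorted_eq_nil_iff]
  | some maxc =>
    simp only
    -- every key's count is between 1 and maxc
    have hkeys : C.keys = PySem.Set.ofList lf := PySem.Dict.keys_counter lf
    have hval : C.values = (PySem.Set.ofList lf).map (fun k => ((lf.count k : Nat) : Int)) := by
      have : C.values = C.items.map (·.2) := rfl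
      rw [this, PySem.Dict.items_counter, List.map_map]
      rfl
    have hbound : ∀ w ∈ C.keys, 1 ≤ C.getD w 0 ∧ C.getD w 0 ≤ maxc := by
      intro w hw
      have hwlf : w ∈ lf := (PySem.Set.mem_ofList lf w).mp (hkeys ▸ hw)
      have h1 : 1 ≤ lf.count w := List.one_le_count_iff.mpr hwlf
      have hvmem : ((lf.count w : Nat) : Int) ∈ C.values := by
        rw [hval]
        exact List.mem_map.mpr ⟨w, hkeys ▸ hw, rfl⟩
      have h2 := PySem.List.max?_isMax hmax _ hvmem
      rw [PySem.Dict.getD_counter]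
      constructor
      · exact_mod_cast h1
      · exact h2
    have hmaxc1 : 1 ≤ maxc := by
      cases hk : C.keys with
      | nil =>
        exfalso
        have : C.values = [] := by rw [hval, ← hkeys, hk]; rfl
        rw [(PySem.List.max?_eq_none_iff C.values (fun v => v)).mpr this] at hmax
        simp at hmax
      | cons w t =>
        have := (hbound w (by rw [hk]; simp))
        omega
    -- turn the bucket loop into filters, then apply the bucket-sort characterisation
    have hbget : ∀ c : Int,
        (C.keys.foldl (fun b w => b.modify (C.getD w 0) [] (fun l => l ++ [w]))
            (PySem.Dict.empty : PySem.Dict Int (List String))).getD c []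
          = C.keys.filter (fun w => decide (C.getD w 0 = c)) := by
      intro c
      rw [buckets_getD (fun w => C.getD w 0) C.keys PySem.Dict.empty c]
      simp [PySem.Dict.getD_of_not_contains (PySem.Dict.empty : PySem.Dict Int (List String))
        ([] : List String) rfl]
    rw [PySem.List.foldl_append_eq_flatMap]
    have hfun : (fun c => (C.keys.foldl (fun b w => b.modify (C.getD w 0) [] (fun l => l ++ [w]))
            (PySem.Dict.empty : PySem.Dict Int (List String))).getD c [])
        = fun c => C.keys.filter (fun w => decide (C.getD w 0 = c)) := funext hbget
    rw [List.nil_append, hfun]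
    have hcast : maxc = ((maxc.toNat : Nat) : Int) := by omega
    rw [hcast]
    exact (buckets_sorted (fun w => C.getD w 0) maxc.toNat C.keys
      (fun w hw => ⟨(hbound w hw).1, by
        show C.getD w 0 ≤ ((maxc.toNat : Nat) : Int)
        have := (hbound w hw).2; have h1 := hmaxc1; omega⟩)).symm

-- ===== VERDICT (by name: the statement is the Claim_ definition above) =====
theorem makeUniqueWordList_spec : Claim_equal_makeUniqueWordList := by
  intro spamList hamList type _
  unfold Spec_makeUniqueWordList makeUniqueWordList makeUniqueWordList_alt
  by_cases h : type = "spam"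
  · simp only [if_pos h, dictA_eq spamList hamList, dictB_eq spamList hamList]
    exact core_eq spamList hamList
  · simp only [if_neg h, dictA_eq hamList spamList, dictB_eq hamList spamList]
    exact core_eq hamList spamList
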